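-- pv_equiv track=rewrite | github.com/Khadijahh0/homework-8th | S_10/main.py | sum_color
-- ===== SOURCE A (Python) =====
-- def sum_color(colors):
--     if not colors:
--         return 0
--
--     color=colors[0]
--
--     time=2
--     for i in range(1,len(colors)):
--         if colors[i]!=color:
--             time+=1
--             color=colors[i]
--
--         time+=2
--
--     return time
-- ===== SOURCE B (Python) =====
-- def sum_color(colors):
--     # Stage 1: build a run-length encoding (value, count) of consecutive runs.
--     runs = []
--     for c in colors:
--         if runs and runs[-1][0] == c:
--             runs[-1] = (c, runs[-1][1] + 1)
--         else:
--             runs.append((c, 1))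
--     if not runs:
--         return 0
--     # Stage 2: arithmetic on the encoding: 2 per element, 1 per run boundary.
--     return sum(2 * cnt for _, cnt in runs) + len(runs) - 1
-- ===== Notes on version B (the rewrite author's own statement) =====
-- stated objective: alternative
-- what changed: Instead of A's single-pass stateful accumulator (running color and incremental time), B first builds an explicit run-length encoding of the list and then computes the total arithmetically from that structure: 2 per element plus one per run boundary.
import Mathlib
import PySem

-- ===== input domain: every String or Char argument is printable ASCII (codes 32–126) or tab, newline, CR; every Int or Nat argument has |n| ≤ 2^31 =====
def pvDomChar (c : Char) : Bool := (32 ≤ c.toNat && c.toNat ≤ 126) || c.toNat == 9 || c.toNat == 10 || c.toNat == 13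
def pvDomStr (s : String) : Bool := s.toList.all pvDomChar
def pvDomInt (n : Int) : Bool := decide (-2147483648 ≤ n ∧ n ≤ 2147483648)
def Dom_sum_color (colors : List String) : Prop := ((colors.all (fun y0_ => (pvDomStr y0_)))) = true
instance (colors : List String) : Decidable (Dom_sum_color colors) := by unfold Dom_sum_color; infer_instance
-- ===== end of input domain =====

-- B replaces A's stateful accumulator loop by two stages: build an explicit run-length
-- encoding of the list, then compute the total arithmetically from it (alternative).

-- ===== PORT A =====
-- A's loop body: given state (color, time) and the current element colors[i]
def pvBodyA (st : String × Int) (x : String) : String × Int :=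
  if x ≠ st.1 then (x, st.2 + 1 + 2) else (st.1, st.2 + 2)

def sum_color (colors : List String) : Int :=
  match colors with
  | [] => 0
  | c0 :: _ =>
    ((PySem.List.pyRange 1 (colors.length : Int) 1).foldl
        (fun st i => pvBodyA st (PySem.List.pyGetD colors i ""))
        (c0, 2)).2

-- ===== PORT B =====
-- one step of B's run-length-encoding loop: extend the last run or open a new one
def pvAddRun (runs : List (String × Int)) (c : String) : List (String × Int) :=
  match runs.getLast? with
  | some (v, k) => if v = c then runs.dropLast ++ [(c, k + 1)] else runs ++ [(c, 1)]
  | none => [(c, 1)]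

def sum_color_alt (colors : List String) : Int :=
  let runs := colors.foldl pvAddRun []
  if runs.isEmpty then 0
  else runs.foldl (fun (s : Int) (p : String × Int) => s + 2 * p.2) 0 + runs.length - 1

-- ===== PRECONDITION & SPEC =====
def Spec_sum_color (colors : List String) (out : Int) : Prop := out = sum_color_alt colors
instance (colors : List String) (out : Int) : Decidable (Spec_sum_color colors out) := by unfold Spec_sum_color; infer_instance

-- ===== CLAIM (what is proved, stated in full; the proofs are below) =====
def Claim_equal_sum_color : Prop := ∀ (colors : List String), Dom_sum_color colors → Spec_sum_color colors (sum_color colors)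

-- ===== LEMMAS AND PROOFS =====

-- B's stage-2 value of a runs list
def pvSval (runs : List (String × Int)) : Int :=
  runs.foldl (fun (s : Int) (p : String × Int) => s + 2 * p.2) 0 + runs.length - 1

theorem pv_foldl2 (l : List (String × Int)) (s : Int) :
    l.foldl (fun (s : Int) (p : String × Int) => s + 2 * p.2) s
      = s + l.foldl (fun (s : Int) (p : String × Int) => s + 2 * p.2) 0 := by
  induction l generalizing s with
  | nil => simp
  | cons p l ih => simp only [List.foldl_cons]; rw [ih, ih (0 + _)]; ring

theorem pv_sval_concat (l : List (String × Int)) (c : String) (k : Int) :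
    pvSval (l ++ [(c, k)])
      = l.foldl (fun (s : Int) (p : String × Int) => s + 2 * p.2) 0 + 2 * k + l.length := by
  unfold pvSval
  rw [List.foldl_append, List.foldl_cons, List.foldl_nil, pv_foldl2]
  simp
  ring

theorem pv_addRun_ne_nil (runs : List (String × Int)) (c : String) :
    pvAddRun runs c ≠ [] := by
  unfold pvAddRun
  match h : runs.getLast? with
  | some (v, k) => simp only []; split_ifs <;> simp
  | none => simp

theorem pv_key (rest : List String) (l : List (String × Int)) (v : String) (k : Int) (t : Int)
    (ht : t = pvSval (l ++ [(v, k)])) :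
    (rest.foldl pvBodyA (v, t)).2 = pvSval (rest.foldl pvAddRun (l ++ [(v, k)])) := by
  induction rest generalizing l v k t with
  | nil => simpa using ht
  | cons x xs ih =>
    simp only [List.foldl_cons, pvBodyA]
    have hlast : (l ++ [(v, k)]).getLast? = some (v, k) := by
      simp [List.getLast?_append]
    by_cases h : x = v
    · subst h
      simp only [ne_eq, not_true_eq_false, if_false]
      have haddr : pvAddRun (l ++ [(x, k)]) x = l ++ [(x, k + 1)] := by
        unfold pvAddRun
        rw [hlast]
        simp [List.dropLast_append_of_ne_nil]
      rw [haddr]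
      apply ih
      rw [ht, pv_sval_concat, pv_sval_concat]
      ring
    · simp only [ne_eq, h, not_false_eq_true, if_true]
      have haddr : pvAddRun (l ++ [(v, k)]) x = (l ++ [(v, k)]) ++ [(x, 1)] := by
        unfold pvAddRun
        rw [hlast]
        simp [Ne.symm h]
      rw [haddr]
      apply ih
      rw [ht, pv_sval_concat, pv_sval_concat]
      rw [List.foldl_append]
      simp only [List.foldl_cons, List.foldl_nil, List.length_append, List.length_cons,
        List.length_nil]
      rw [pv_foldl2]
      push_cast
      ring

-- ===== VERDICT (by name: the statement is the Claim_ definition above) =====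
theorem sum_color_spec : Claim_equal_sum_color := by
  intro colors _
  unfold Spec_sum_color
  cases colors with
  | nil => simp [sum_color, sum_color_alt]
  | cons c0 rest =>
    show ((PySem.List.pyRange 1 ((c0 :: rest).length : Int) 1).foldl
        (fun st i => pvBodyA st (PySem.List.pyGetD (c0 :: rest) i "")) (c0, 2)).2
      = sum_color_alt (c0 :: rest)
    rw [PySem.List.foldl_pyRange_pyGetD' (xs := c0 :: rest) (d := "") (f := pvBodyA) (init := (c0, 2)) (a := 1) (by norm_num)]
    unfold sum_color_alt
    simp only [Int.toNat_one, List.drop_succ_cons, List.drop_zero, List.foldl_cons]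
    have h0 : pvAddRun [] c0 = [] ++ [(c0, 1)] := by unfold pvAddRun; simp
    rw [h0]
    have hne : ∀ (ys : List String) (start : List (String × Int)), start ≠ [] →
        ys.foldl pvAddRun start ≠ [] := by
      intro ys
      induction ys with
      | nil => intro start hs; simpa using hs
      | cons y ys ihy => intro start hs; exact ihy _ (pv_addRun_ne_nil start y)
    have hkey := pv_key rest [] c0 1 2 (by unfold pvSval; simp)
    simp only [List.nil_append] at hkey
    rw [hkey]
    have hne' := hne rest [(c0, 1)] (by simp)
    rw [if_neg (by simpa [List.isEmpty_iff] using hne')]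
    rfl
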